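-- pv_equiv track=rewrite | github.com/chrisarseno/nexus | src/nexus/rag/context_window_manager.py | _find_syntactic_boundaries
-- ===== SOURCE A (Python) =====
-- def _find_syntactic_boundaries(content_str):
--     """Find syntactic boundaries in text."""
--     # Simple paragraph-based boundaries
--     paragraphs = content_str.split('\n\n')
--     boundaries = []
--     start = 0
--     for paragraph in paragraphs:
--         end = start + len(paragraph) + 2  # +2 for double newline
--         if end <= len(content_str):
--             boundaries.append((start, end))
--         start = end
--     return boundaries if boundaries else [(0, len(content_str))]
-- ===== SOURCE B (Python) =====
-- def _find_syntactic_boundaries(content_str):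
--     """Find syntactic boundaries in text (find-based scan instead of split)."""
--     boundaries = []
--     prev = 0
--     pos = content_str.find('\n\n')
--     while pos != -1:
--         boundaries.append((prev, pos + 2))
--         prev = pos + 2
--         pos = content_str.find('\n\n', prev)
--     return boundaries if boundaries else [(0, len(content_str))]
-- ===== Notes on version B (the rewrite author's own statement) =====
-- stated objective: alternative
-- what changed: Replaces the split('\n\n')-then-accumulate-lengths pass (which materialises every paragraph and drops the trailing span) by a direct find-loop that emits one span per '\n\n' occurrence without building the paragraph list.
import Mathlib
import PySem

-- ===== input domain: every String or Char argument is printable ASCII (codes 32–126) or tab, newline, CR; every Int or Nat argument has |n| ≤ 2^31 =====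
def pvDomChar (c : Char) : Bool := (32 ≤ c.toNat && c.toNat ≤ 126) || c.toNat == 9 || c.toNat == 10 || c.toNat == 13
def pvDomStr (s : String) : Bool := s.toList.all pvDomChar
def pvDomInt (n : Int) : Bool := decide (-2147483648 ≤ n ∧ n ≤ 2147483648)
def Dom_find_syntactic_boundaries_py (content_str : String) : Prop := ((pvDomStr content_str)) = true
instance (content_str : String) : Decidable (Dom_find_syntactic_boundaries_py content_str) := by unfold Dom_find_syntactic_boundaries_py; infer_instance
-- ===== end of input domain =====

-- B replaces the split('\n\n')-and-accumulate-lengths pass by a direct find-loop over delimiter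
-- positions (alternative decomposition, same cost); return value only, no mutation involved.

-- ===== PORT A =====
-- paragraphs = content_str.split('\n\n'); running start; keep (start, end) while end <= len
def find_syntactic_boundaries_py (content_str : String) : List (Int × Int) :=
  let s := content_str.toList
  let paragraphs := PySem.Chars.splitOn s ['\n', '\n']
  let r := paragraphs.foldl
    (fun (st : List (Int × Int) × Int) paragraph =>
      let e := st.2 + (paragraph.length : Int) + 2
      (if e ≤ (s.length : Int) then st.1 ++ [(st.2, e)] else st.1, e))
    ([], 0)
  if r.1 = [] then [((0 : Int), (s.length : Int))] else r.1

-- ===== PORT B =====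
-- the while-loop of Source B: pos = content_str.find('\n\n', prev); emit (prev, pos+2); prev = pos+2
def bLoop (s : List Char) (prev : Nat) : List (Int × Int) :=
  let pos := PySem.Chars.findFrom s ['\n', '\n'] (prev : Int) none
  if h : pos = -1 then []
  else ((prev : Int), pos + 2) :: bLoop s (pos.toNat + 2)
termination_by s.length + 2 - prev
decreasing_by
  have hle : prev ≤ s.length := by
    by_contra hgt
    apply h
    show PySem.Chars.findFrom s ['\n', '\n'] (prev : Int) none = -1
    unfold PySem.Chars.findFrom
    simp only []
    rw [if_pos (by omega)]
  have hspec := PySem.Chars.findFrom_natCast_spec s ['\n', '\n'] prev hle h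
  have hpre := hspec.2.1
  have hlen := hpre.length_le
  simp only [List.length_drop, List.length_cons, List.length_nil] at hlen
  have h1 := hspec.1
  omega

def find_syntactic_boundaries_py_alt (content_str : String) : List (Int × Int) :=
  let s := content_str.toList
  let boundaries := bLoop s 0
  if boundaries = [] then [((0 : Int), (s.length : Int))] else boundaries

-- ===== PRECONDITION & SPEC =====
def Spec_find_syntactic_boundaries_py (content_str : String) (out : List (Int × Int)) : Prop := out = find_syntactic_boundaries_py_alt content_str
instance (content_str : String) (out : List (Int × Int)) : Decidable (Spec_find_syntactic_boundaries_py content_str out) := by unfold Spec_find_syntactic_boundaries_py; infer_instance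

-- ===== CLAIM (what is proved, stated in full; the proofs are below) =====
def Claim_equal_find_syntactic_boundaries_py : Prop := ∀ (content_str : String), Dom_find_syntactic_boundaries_py content_str → Spec_find_syntactic_boundaries_py content_str (find_syntactic_boundaries_py content_str)

-- ===== LEMMAS AND PROOFS =====

-- reference splitter: sp l = l.split on "\n\n", as plain structural recursion
def sp : List Char → List (List Char)
  | [] => [[]]
  | c :: rest =>
    if ['\n', '\n'].isPrefixOf (c :: rest) then [] :: sp (rest.drop 1)
    else (sp rest).modifyHead (c :: ·)
termination_by l => l.length
decreasing_by all_goals (simp only [List.length_drop, List.length_cons]; omega)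

theorem sp_ne_nil (l : List Char) : sp l ≠ [] := by
  induction l with
  | nil => simp [sp]
  | cons c rest ih =>
    rw [sp]
    split_ifs
    · simp
    · cases h : sp rest with
      | nil => exact absurd h ih
      | cons a b => simp [h, List.modifyHead]

theorem splitOn_go_eq (fuel : Nat) : ∀ (l cur : List Char) (accs : List (List Char)),
    l.length ≤ fuel →
    PySem.Chars.splitOn.go ['\n', '\n'] fuel l cur accs =
      accs.reverse ++ (sp l).modifyHead (cur.reverse ++ ·) := by
  induction fuel with
  | zero =>
    intro l cur accs hl
    have : l = [] := by cases l <;> simp_all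
    subst this
    simp [PySem.Chars.splitOn.go, sp]
  | succ fuel ih =>
    intro l cur accs hl
    cases l with
    | nil => simp [PySem.Chars.splitOn.go, sp]
    | cons c rest =>
      rw [PySem.Chars.splitOn.go]
      split_ifs with hp
      · rw [ih _ _ _ (by simp at hl ⊢; omega)]
        rw [sp]
        simp only [hp, if_true, List.modifyHead, List.reverse_cons, List.nil_append,
          List.append_assoc, List.singleton_append, List.drop_one, List.length_cons]
        cases hsp : sp rest.tail <;> simp [hsp]
      · rw [ih _ _ _ (by simp at hl ⊢; omega)]
        rw [sp]
        simp only [hp, if_false]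
        obtain ⟨hd, tl, hsp⟩ : ∃ hd tl, sp rest = hd :: tl := by
          cases h : sp rest with
          | nil => exact absurd h (sp_ne_nil rest)
          | cons a b => exact ⟨a, b, rfl⟩
        simp [hsp, List.modifyHead]

theorem splitOn_eq_sp (s : List Char) : PySem.Chars.splitOn s ['\n', '\n'] = sp s := by
  rw [PySem.Chars.splitOn, splitOn_go_eq (s.length + 1) s [] [] (by omega)]
  obtain ⟨hd, tl, hsp⟩ : ∃ hd tl, sp s = hd :: tl := by
    cases h : sp s with
    | nil => exact absurd h (sp_ne_nil s)
    | cons a b => exact ⟨a, b, rfl⟩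
  simp [hsp, List.modifyHead]

-- sp on a list with no "\n\n"
theorem sp_no_occ (l : List Char) (h : ¬ ['\n', '\n'] <:+: l) : sp l = [l] := by
  induction l with
  | nil => simp [sp]
  | cons c rest ih =>
    rw [sp]
    have hnp : ¬ ['\n', '\n'].isPrefixOf (c :: rest) := by
      intro hp
      exact h ((List.isPrefixOf_iff_prefix.mp hp).isInfix)
    have hni : ¬ ['\n', '\n'] <:+: rest := fun hi => h (hi.trans (List.suffix_cons c rest).isInfix)
    simp [hnp, ih hni, List.modifyHead]

-- sp when the FIRST occurrence is at index p
theorem sp_first_occ (l : List Char) (p : Nat)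
    (hocc : ['\n', '\n'] <+: l.drop p) (hmin : ∀ i, i < p → ¬ ['\n', '\n'] <+: l.drop i) :
    sp l = l.take p :: sp (l.drop (p + 2)) := by
  induction l generalizing p with
  | nil =>
    exfalso
    simp only [List.drop_nil] at hocc
    exact absurd hocc.length_le (by simp)
  | cons c rest ih =>
    cases p with
    | zero =>
      rw [sp]
      have hp : ['\n', '\n'].isPrefixOf (c :: rest) := List.isPrefixOf_iff_prefix.mpr (by simpa using hocc)
      simp [hp]
    | succ p =>
      rw [sp]
      have hnp : ¬ ['\n', '\n'].isPrefixOf (c :: rest) := by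
        intro hp
        exact hmin 0 (by omega) (by simpa using List.isPrefixOf_iff_prefix.mp hp)
      have hocc' : ['\n', '\n'] <+: rest.drop p := by simpa using hocc
      have hmin' : ∀ i, i < p → ¬ ['\n', '\n'] <+: rest.drop i := by
        intro i hi hpre
        exact hmin (i + 1) (by omega) (by simpa using hpre)
      simp [hnp, ih p hocc' hmin', List.modifyHead]

-- the f that A folds with
def stepA (n : Int) (st : List (Int × Int) × Int) (paragraph : List Char) : List (Int × Int) × Int :=
  let e := st.2 + (paragraph.length : Int) + 2
  (if e ≤ n then st.1 ++ [(st.2, e)] else st.1, e)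

-- main loop correspondence: A's fold over sp (s.drop k) started at k produces exactly bLoop s k
theorem fold_eq_bLoop (s : List Char) (k : Nat) (hk : k ≤ s.length) (acc : List (Int × Int)) :
    ((sp (s.drop k)).foldl (stepA (s.length : Int)) (acc, (k : Int))).1 = acc ++ bLoop s k := by
  rw [bLoop]
  by_cases hocc : ['\n', '\n'] <:+: s.drop k
  · -- an occurrence exists: find it
    have hfind : PySem.Chars.find (s.drop k) ['\n', '\n'] ≠ -1 :=
      (PySem.Chars.find_ne_neg_one_iff _ _).mpr hocc
    have hnn : 0 ≤ PySem.Chars.find (s.drop k) ['\n', '\n'] :=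
      (PySem.Chars.find_nonneg_iff _ _).mpr hocc
    set p : Nat := (PySem.Chars.find (s.drop k) ['\n', '\n']).toNat with hp
    have hfp : PySem.Chars.find (s.drop k) ['\n', '\n'] = (p : Int) := by omega
    have hspec := PySem.Chars.find_spec (s := s.drop k) (sub := ['\n', '\n']) hnn
    have hpre : ['\n', '\n'] <+: (s.drop k).drop p := hspec.1
    have hmin : ∀ i, i < p → ¬ ['\n', '\n'] <+: (s.drop k).drop i := fun i hi => hspec.2 i hi
    have hlen : p + 2 ≤ s.length - k := by
      have := hpre.length_le
      simp at this
      omega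
    have hFrom : PySem.Chars.findFrom s ['\n', '\n'] (k : Int) none = ((k + p : Nat) : Int) := by
      rw [PySem.Chars.findFrom_natCast s ['\n', '\n'] k hk, hfp]
      have hne : ((p : Int)) ≠ -1 := by omega
      simp only [hne, if_false, if_neg]
      push_cast; ring
    rw [sp_first_occ (s.drop k) p hpre hmin]
    rw [List.foldl_cons]
    have htake : ((s.drop k).take p).length = p := by
      simp only [List.length_take, List.length_drop]
      omega
    have hstep : stepA (s.length : Int) (acc, (k : Int)) ((s.drop k).take p)
        = (acc ++ [((k : Int), ((k + p + 2 : Nat) : Int))], ((k + p + 2 : Nat) : Int)) := by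
      simp only [stepA, htake]
      have he : (k : Int) + (p : Int) + 2 ≤ (s.length : Int) := by push_cast; omega
      simp only [he, if_pos]
      constructor <;> push_cast <;> ring_nf
    rw [hstep]
    have hdd : (s.drop k).drop (p + 2) = s.drop (k + p + 2) := by
      rw [List.drop_drop]; ring_nf
    rw [hdd]
    rw [fold_eq_bLoop s (k + p + 2) (by omega) (acc ++ [((k : Int), ((k + p + 2 : Nat) : Int))])]
    have hne : PySem.Chars.findFrom s ['\n', '\n'] (k : Int) none ≠ -1 := by
      rw [hFrom]; omega
    simp only [hne, dif_neg, not_false_iff]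
    rw [hFrom]
    have : (((k + p : Nat) : Int)).toNat + 2 = k + p + 2 := by omega
    rw [this]
    have : ((k + p : Nat) : Int) + 2 = ((k + p + 2 : Nat) : Int) := by push_cast; ring
    rw [this]
    simp
  · -- no occurrence: last paragraph dropped by A, loop ends in B
    have hfind : PySem.Chars.find (s.drop k) ['\n', '\n'] = -1 :=
      (PySem.Chars.find_eq_neg_one_iff _ _).mpr hocc
    have hFrom : PySem.Chars.findFrom s ['\n', '\n'] (k : Int) none = -1 := by
      rw [PySem.Chars.findFrom_natCast s ['\n', '\n'] k hk, hfind]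
      simp
    rw [sp_no_occ (s.drop k) hocc]
    simp only [List.foldl_cons, List.foldl_nil, stepA, List.length_drop]
    have hgt : ¬ ((k : Int) + ((s.length - k : Nat) : Int) + 2 ≤ (s.length : Int)) := by
      push_cast [Nat.cast_sub hk]; omega
    simp [hgt, hFrom]
termination_by s.length - k
decreasing_by
  have := hpre.length_le
  simp only [List.length_drop] at this
  omega

-- ===== VERDICT (by name: the statement is the Claim_ definition above) =====
theorem find_syntactic_boundaries_py_spec : Claim_equal_find_syntactic_boundaries_py := by
  intro content_str _
  unfold Spec_find_syntactic_boundaries_py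
  unfold find_syntactic_boundaries_py find_syntactic_boundaries_py_alt
  simp only [splitOn_eq_sp]
  have h := fold_eq_bLoop content_str.toList 0 (by omega) []
  simp only [List.drop_zero, List.nil_append] at h
  show (if (List.foldl (stepA (content_str.toList.length : Int)) ([], ((0 : Nat) : Int))
          (sp content_str.toList)).1 = [] then
      [((0 : Int), (content_str.toList.length : Int))]
    else (List.foldl (stepA (content_str.toList.length : Int)) ([], ((0 : Nat) : Int))
          (sp content_str.toList)).1)
    = (if bLoop content_str.toList 0 = [] then
        [((0 : Int), (content_str.toList.length : Int))]
      else bLoop content_str.toList 0)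
  rw [h]
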